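-- pv_equiv track=rewrite | github.com/minkyunglee1012/Leetcode_Algorithm_Practice | 2399-check-distances-between-same-letters/2399-check-distances-between-same-letters.py | checkDistances
-- ===== SOURCE A (Python) =====
-- from typing import List
--
-- def checkDistances(s: str, distance: List[int]) -> bool:
--     dist = [-1] * (len(distance))
--
--     n = len(s)
--
--     for i in range(n):
--         index = ord(s[i]) - ord('a')
--
--         if dist[index] == -1:
--             dist[index] = i
--         else:
--             if distance[index] != (i - dist[index] - 1):
--                 return False
--
--     return True
-- ===== SOURCE B (Python) =====
-- from typing import List
--
-- def checkDistances(s: str, distance: List[int]) -> bool: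
--     # Two staged passes over a dict-of-lists: first group all indices by
--     # character, then validate each later occurrence against the first index.
--     positions = {}
--     for i, c in enumerate(s):
--         positions.setdefault(c, []).append(i)
--     for c, idxs in positions.items():
--         base = idxs[0]
--         for idx in idxs[1:]:
--             if distance[ord(c) - ord('a')] != idx - base - 1:
--                 return False
--     return True
-- ===== Notes on version B (the rewrite author's own statement) =====
-- stated objective: alternative
-- what changed: Replaces A's single pass with a 26-slot first-occurrence array and in-loop checks by two staged passes: build a dict mapping each character to the list of all its indices, then validate every later index of each character against that character's first index.
-- outside the precondition, e.g. on checkDistances('b_x', [1, 1, 6]): A returns False, B returns True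
import Mathlib
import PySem

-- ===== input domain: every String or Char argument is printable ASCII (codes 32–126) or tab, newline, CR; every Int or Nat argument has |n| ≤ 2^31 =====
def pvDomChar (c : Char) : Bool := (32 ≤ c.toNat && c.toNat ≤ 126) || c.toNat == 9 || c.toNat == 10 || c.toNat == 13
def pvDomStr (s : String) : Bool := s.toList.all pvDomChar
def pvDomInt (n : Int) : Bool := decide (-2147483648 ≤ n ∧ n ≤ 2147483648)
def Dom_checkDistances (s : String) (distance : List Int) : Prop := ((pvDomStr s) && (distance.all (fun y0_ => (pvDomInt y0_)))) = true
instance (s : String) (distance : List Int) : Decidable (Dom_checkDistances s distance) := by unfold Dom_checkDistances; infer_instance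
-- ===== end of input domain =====

-- B replaces A's single pass with a 26-slot first-occurrence array by two staged
-- passes over a dict-of-lists: group every index by character, then validate each
-- later index against the character's first index (alternative decomposition; not faster).

-- ===== PORT A =====
-- dist[index] = i for an in-range Python index (out-of-range raises in Python; excluded by Pre_)
def pySetIntA (xs : List Int) (i v : Int) : List Int :=
  if i < 0 then xs.set (xs.length + i).toNat v else xs.set i.toNat v

-- the loop 'for i in range(n)' with early return, carrying the mutable dist
def goA (cs : List Char) (distance : List Int) (dist : List Int) : List Int → Bool
  | [] => true
  | i :: rest =>
    let c := (PySem.List.pyGet? cs i).getD ' '   -- s[i]; i always in range here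
    let index : Int := (c.toNat : Int) - 97       -- ord(s[i]) - ord('a')
    if PySem.List.pyGetD dist index 0 = -1 then
      goA cs distance (pySetIntA dist index i) rest
    else if PySem.List.pyGetD distance index 0 ≠ i - PySem.List.pyGetD dist index 0 - 1 then
      false
    else
      goA cs distance dist rest

def checkDistances (s : String) (distance : List Int) : Bool :=
  goA s.toList distance (List.replicate distance.length (-1))
    (PySem.List.pyRange 0 (s.toList.length : Int) 1)

-- ===== PORT B =====
-- pass 1: positions.setdefault(c, []).append(i) over enumerate(s)
def buildPosB (cs : List Char) : PySem.Dict Char (List Int) :=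
  (PySem.List.enumerate cs 0).foldl
    (fun d p => d.modify p.2 [] (fun v => v ++ [p.1])) PySem.Dict.empty

-- pass 2: for c, idxs in positions.items(): check idxs[1:] against base = idxs[0]
-- (the inner 'for … return False' is the all-check; distance[…] is in range under Pre_)
def checkItemsB (distance : List Int) : List (Char × List Int) → Bool
  | [] => true
  | (c, idxs) :: rest =>
    let base := PySem.List.pyGetD idxs 0 0      -- idxs[0]; every stored list is nonempty
    if (PySem.List.slice idxs (some 1) none).all
        (fun idx => PySem.List.pyGetD distance ((c.toNat : Int) - 97) 0 == idx - base - 1)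
    then checkItemsB distance rest
    else false

def checkDistances_alt (s : String) (distance : List Int) : Bool :=
  checkItemsB distance (buildPosB s.toList).items

-- ===== PRECONDITION & SPEC =====
-- Pre_ excludes inputs where A raises IndexError (a character's slot ord(c)-97 outside
-- [-len(distance), len(distance))) and also inputs on which A only returns via Python's
-- negative-index WRAPAROUND, which aliases distinct characters to the same slot — an
-- accident of A's list indexing, not part of the task's letter-distance behaviour.
def Pre_checkDistances (s : String) (distance : List Int) : Prop :=
  (s.toList.all fun c => 97 ≤ c.toNat && c.toNat - 97 < distance.length) = true
instance (s : String) (distance : List Int) : Decidable (Pre_checkDistances s distance) := by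
  unfold Pre_checkDistances; infer_instance

def pvWitness_checkDistances : String × List Int := ("ab", [0, 0])

def Spec_checkDistances (s : String) (distance : List Int) (out : Bool) : Prop := out = checkDistances_alt s distance
instance (s : String) (distance : List Int) (out : Bool) : Decidable (Spec_checkDistances s distance out) := by unfold Spec_checkDistances; infer_instance

-- ===== CLAIM (what is proved, stated in full; the proofs are below) =====
def Claim_equal_checkDistances : Prop := ∀ (s : String) (distance : List Int), Dom_checkDistances s distance → Pre_checkDistances s distance → Spec_checkDistances s distance (checkDistances s distance)

-- ===== LEMMAS AND PROOFS =====

-- the common specification both ports are reduced to: every non-first occurrence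
-- of a character is at the distance prescribed for its slot
def specB (cs : List Char) (distance : List Int) : Bool :=
  cs.zipIdx.all fun p =>
    decide (cs.idxOf p.1 = p.2)
      || (distance.getD (p.1.toNat - 97) 0 == (p.2 : Int) - (cs.idxOf p.1 : Int) - 1)

lemma specB_iff (cs : List Char) (distance : List Int) :
    specB cs distance = true ↔
      ∀ (i : Nat) (hi : i < cs.length), cs.idxOf cs[i] ≠ i →
        distance.getD (cs[i].toNat - 97) 0 = (i : Int) - (cs.idxOf cs[i] : Int) - 1 := by
  unfold specB
  rw [List.all_eq_true]
  constructor
  · intro H i hi hne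
    have := H (cs[i], i) (by rw [List.mem_zipIdx_iff_getElem?]; simp [hi])
    simp only [Bool.or_eq_true, decide_eq_true_eq, beq_iff_eq] at this
    exact this.resolve_left hne
  · intro H p hp
    rw [List.mem_zipIdx_iff_getElem?] at hp
    have hlt : p.2 < cs.length := by
      by_contra hge
      rw [List.getElem?_eq_none (by omega)] at hp
      simp at hp
    have hpe : cs[p.2] = p.1 := by
      rw [List.getElem?_eq_getElem hlt] at hp
      simpa using hp
    simp only [Bool.or_eq_true, decide_eq_true_eq, beq_iff_eq]
    by_cases hne : cs.idxOf p.1 = p.2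
    · exact Or.inl hne
    · exact Or.inr (hpe ▸ H p.2 hlt (hpe ▸ hne))

lemma pre_forall (s : String) (distance : List Int) (h : Pre_checkDistances s distance) :
    ∀ c ∈ s.toList, 97 ≤ c.toNat ∧ c.toNat - 97 < distance.length := by
  intro c hc
  have := (List.all_eq_true.mp h) c hc
  simp only [Bool.and_eq_true, decide_eq_true_eq] at this
  exact this

-- ---------- B side ----------

-- the index list stored for character c: the first components of the enumerate
-- pairs whose character is c
def occB (cs : List Char) (c : Char) : List Int :=
  ((PySem.List.enumerate cs 0).filter (fun p => p.2 == c)).map (fun p => p.1)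

lemma getD_buildPosB (cs : List Char) (c : Char) :
    (buildPosB cs).getD c [] = occB cs c := by
  unfold buildPosB occB
  have hfold : (PySem.List.enumerate cs 0).foldl
      (fun d p => d.modify p.2 [] (fun v => v ++ [p.1])) PySem.Dict.empty
      = ((PySem.List.enumerate cs 0).map Prod.swap).foldl
          (fun d p => d.modify p.1 [] (fun v => v ++ [p.2])) PySem.Dict.empty := by
    rw [List.foldl_map]
    rfl
  rw [hfold, PySem.Dict.getD_foldl_modify_append, PySem.Dict.getD_empty]
  rw [List.filter_map, List.map_map]
  rfl

lemma mem_occB (cs : List Char) (c : Char) (x : Int) :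
    x ∈ occB cs c ↔ ∃ (k : Nat) (h : k < cs.length), cs[k] = c ∧ x = (k : Int) := by
  unfold occB
  simp only [List.mem_map, List.mem_filter, PySem.List.mem_enumerate_iff]
  constructor
  · rintro ⟨p, ⟨⟨k, hk, rfl⟩, hc⟩, rfl⟩
    simp only [beq_iff_eq] at hc
    exact ⟨k, hk, hc, by simp⟩
  · rintro ⟨k, hk, hc, rfl⟩
    exact ⟨((k : Int), cs[k]), ⟨⟨k, hk, by simp⟩, by simp [hc]⟩, rfl⟩

lemma pairwise_occB (cs : List Char) (c : Char) :
    (occB cs c).Pairwise (· < ·) := by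
  unfold occB
  rw [List.pairwise_map]
  exact (PySem.List.pairwise_lt_enumerate cs 0).filter _

lemma occB_of_mem (cs : List Char) (c : Char) (h : c ∈ cs) :
    ∃ t, occB cs c = ((cs.idxOf c : Nat) : Int) :: t ∧
      ∀ x, x ∈ t ↔ x ∈ occB cs c ∧ x ≠ ((cs.idxOf c : Nat) : Int) := by
  have hidx : cs.idxOf c < cs.length := List.idxOf_lt_length_of_mem h
  have hmemi : ((cs.idxOf c : Nat) : Int) ∈ occB cs c :=
    (mem_occB cs c _).mpr ⟨cs.idxOf c, hidx, List.getElem_idxOf hidx, rfl⟩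
  obtain ⟨a, t, he⟩ := List.exists_cons_of_ne_nil (List.ne_nil_of_mem hmemi)
  have hpw := pairwise_occB cs c
  rw [he] at hpw hmemi
  have hlt : ∀ y ∈ t, a < y := (List.pairwise_cons.mp hpw).1
  have ha : a = ((cs.idxOf c : Nat) : Int) := by
    obtain ⟨k, hk, hck, hak⟩ := (mem_occB cs c a).mp (he ▸ List.mem_cons_self)
    have h1 : cs.idxOf c ≤ k := by
      have hmemk : c ∈ cs.take (k + 1) := by
        rw [← hck]
        have hgt : (cs.take (k + 1))[k]'(by simp; omega) = cs[k] := List.getElem_take ..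
        rw [← hgt]; exact List.getElem_mem _
      have := (List.mem_take_iff_idxOf_lt h).mp hmemk
      omega
    rcases List.mem_cons.mp hmemi with heq | hmt
    · omega
    · have := hlt _ hmt; omega
  subst ha
  refine ⟨t, he, fun x => ?_⟩
  rw [he]
  constructor
  · intro hx
    exact ⟨List.mem_cons_of_mem _ hx, by have := hlt x hx; omega⟩
  · rintro ⟨hx, hne⟩
    rcases List.mem_cons.mp hx with rfl | hmt
    · exact absurd rfl hne
    · exact hmt

lemma checkItemsB_eq_all (distance : List Int) (L : List (Char × List Int)) :
    checkItemsB distance L = L.all (fun q =>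
      (PySem.List.slice q.2 (some 1) none).all
        (fun idx => PySem.List.pyGetD distance ((q.1.toNat : Int) - 97) 0
          == idx - PySem.List.pyGetD q.2 0 0 - 1)) := by
  induction L with
  | nil => rfl
  | cons q rest ih =>
    obtain ⟨c, idxs⟩ := q
    simp only [checkItemsB, List.all_cons]
    by_cases hc : (PySem.List.slice idxs (some 1) none).all
        (fun idx => PySem.List.pyGetD distance ((c.toNat : Int) - 97) 0
          == idx - PySem.List.pyGetD idxs 0 0 - 1) = true
    · rw [if_pos hc, hc, ih]; simp
    · rw [if_neg hc]
      rw [Bool.not_eq_true] at hc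
      rw [hc]; simp

lemma keys_buildPosB (cs : List Char) :
    (buildPosB cs).keys = PySem.Set.ofList cs := by
  unfold buildPosB
  rw [PySem.Dict.keys_foldl_modify_key]
  rw [PySem.List.map_snd_enumerate, PySem.Dict.keys_empty]
  exact PySem.Set.update_nil_left cs

lemma nodup_keys_buildPosB (cs : List Char) :
    (buildPosB cs).keys.Nodup := by
  rw [keys_buildPosB]
  exact PySem.Set.nodup_ofList cs

lemma alt_eq_spec (s : String) (distance : List Int)
    (hP0 : Pre_checkDistances s distance) :
    checkDistances_alt s distance = specB s.toList distance := by
  have hP := pre_forall s distance hP0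
  set cs := s.toList with hcs
  rw [Bool.eq_iff_iff, specB_iff]
  unfold checkDistances_alt
  rw [checkItemsB_eq_all,
    PySem.Dict.items_eq_map_keys (buildPosB cs) (nodup_keys_buildPosB cs) ([] : List Int),
    keys_buildPosB, List.all_map, List.all_eq_true]
  simp only [Function.comp_apply]
  have hkey : ∀ c, c ∈ PySem.Set.ofList cs ↔ c ∈ cs := fun c => PySem.Set.mem_ofList cs c
  constructor
  · -- alt ⇒ spec
    intro H i hi hne
    set c := cs[i] with hc
    have hcmem : c ∈ cs := List.getElem_mem hi
    have := H c ((hkey c).mpr hcmem)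
    simp only [getD_buildPosB] at this
    obtain ⟨t, hocc, hmemt⟩ := occB_of_mem cs c hcmem
    rw [hocc] at this
    have hbase : PySem.List.pyGetD (((cs.idxOf c : Nat) : Int) :: t) 0 0
        = ((cs.idxOf c : Nat) : Int) := by
      simp [PySem.List.pyGetD, PySem.List.pyIdx?, PySem.List.pyGet?]
    have htail : PySem.List.slice (((cs.idxOf c : Nat) : Int) :: t) (some 1) none = t := by
      rw [PySem.List.slice_from_one]; rfl
    rw [htail, hbase, List.all_eq_true] at this
    have hit : ((i : Nat) : Int) ∈ t := by
      rw [hmemt]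
      refine ⟨(mem_occB cs c _).mpr ⟨i, hi, rfl, rfl⟩, ?_⟩
      intro he
      exact hne (by exact_mod_cast he.symm)
    have hval := this _ hit
    simp only [beq_iff_eq] at hval
    obtain ⟨h97, hlt⟩ := hP c hcmem
    rw [show ((c.toNat : Int) - 97) = ((c.toNat - 97 : Nat) : Int) by omega,
        PySem.List.pyGetD_natCast] at hval
    exact hval
  · -- spec ⇒ alt
    intro H c hcS
    have hcmem : c ∈ cs := (hkey c).mp hcS
    simp only [getD_buildPosB]
    obtain ⟨t, hocc, hmemt⟩ := occB_of_mem cs c hcmem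
    rw [hocc]
    have hbase : PySem.List.pyGetD (((cs.idxOf c : Nat) : Int) :: t) 0 0
        = ((cs.idxOf c : Nat) : Int) := by
      simp [PySem.List.pyGetD, PySem.List.pyIdx?, PySem.List.pyGet?]
    have htail : PySem.List.slice (((cs.idxOf c : Nat) : Int) :: t) (some 1) none = t := by
      rw [PySem.List.slice_from_one]; rfl
    rw [htail, hbase, List.all_eq_true]
    intro idx hidxt
    obtain ⟨hocc', hne⟩ := (hmemt idx).mp hidxt
    obtain ⟨k, hk, hck, rfl⟩ := (mem_occB cs c idx).mp hocc'
    have hne' : cs.idxOf cs[k] ≠ k := by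
      rw [hck]
      intro he
      exact hne (by exact_mod_cast he.symm)
    have hval := H k hk hne'
    rw [hck] at hval
    obtain ⟨h97, hlt⟩ := hP c hcmem
    simp only [beq_iff_eq]
    rw [show ((c.toNat : Int) - 97) = ((c.toNat - 97 : Nat) : Int) by omega,
        PySem.List.pyGetD_natCast, hval]

-- ---------- A side ----------

lemma goA_spec (cs : List Char) (distance : List Int)
    (hP : ∀ c ∈ cs, 97 ≤ c.toNat ∧ c.toNat - 97 < distance.length) :
    ∀ (m k : Nat) (dist : List Int), k + m = cs.length →
      dist.length = distance.length →
      (∀ c' : Char, 97 ≤ c'.toNat → c'.toNat - 97 < distance.length →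
        dist.getD (c'.toNat - 97) 0 = if c' ∈ cs.take k then (cs.idxOf c' : Int) else -1) →
      goA cs distance dist (PySem.List.pyRange (k : Int) (cs.length : Int) 1) =
        decide (∀ (i : Nat) (hi : i < cs.length), k ≤ i → cs.idxOf cs[i] ≠ i →
          distance.getD (cs[i].toNat - 97) 0 = (i : Int) - (cs.idxOf cs[i] : Int) - 1) := by
  intro m
  induction m with
  | zero =>
    intro k dist hkm hlen hdist
    rw [PySem.List.pyRange_one_eq_nil (by exact_mod_cast Nat.le_of_eq hkm.symm)]
    simp only [goA]
    symm
    rw [decide_eq_true_eq]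
    intro i hi hki hne
    exact absurd hi (by omega)
  | succ m ih =>
    intro k dist hkm hlen hdist
    have hk : k < cs.length := by omega
    have hcm : cs[k] ∈ cs := List.getElem_mem hk
    obtain ⟨h97, hslot⟩ := hP _ hcm
    rw [PySem.List.pyRange_one_cons (by exact_mod_cast hk)]
    have hc : (PySem.List.pyGet? cs (k : Int)).getD ' ' = cs[k] := by
      rw [PySem.List.pyGet?_natCast, List.getElem?_eq_getElem hk]; rfl
    have hidx : ((cs[k].toNat : Int) - 97) = ((cs[k].toNat - 97 : Nat) : Int) := by omega
    have hcast : ((k : Int) + 1) = ((k + 1 : Nat) : Int) := by push_cast; ring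
    simp only [goA, hc, hidx, PySem.List.pyGetD_natCast]
    rw [hdist _ h97 hslot]
    by_cases hmem : cs[k] ∈ cs.take k
    · rw [if_pos hmem]
      have hjk : cs.idxOf cs[k] < k := (List.mem_take_iff_idxOf_lt hcm).mp hmem
      rw [if_neg (by omega : ¬((cs.idxOf cs[k] : Int) = -1))]
      have hdist' : ∀ c' : Char, 97 ≤ c'.toNat → c'.toNat - 97 < distance.length →
          dist.getD (c'.toNat - 97) 0 = if c' ∈ cs.take (k + 1) then (cs.idxOf c' : Int) else -1 := by
        intro c' h1 h2
        rw [hdist c' h1 h2]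
        refine if_congr ?_ rfl rfl
        rw [List.take_add_one, List.getElem?_eq_getElem hk]
        simp only [Option.toList_some, List.mem_append, List.mem_singleton]
        constructor
        · exact Or.inl
        · rintro (h | rfl)
          · exact h
          · exact hmem
      by_cases hchk : distance.getD (cs[k].toNat - 97) 0 = (k : Int) - (cs.idxOf cs[k] : Int) - 1
      · rw [if_neg (not_not_intro hchk), hcast, ih (k + 1) dist (by omega) hlen hdist']
        rw [decide_eq_decide]
        constructor
        · intro H i hi hki hne
          rcases Nat.eq_or_lt_of_le hki with he | hlt
          · subst he; exact hchk
          · exact H i hi hlt hne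
        · intro H i hi hki hne
          exact H i hi (by omega) hne
      · rw [if_pos hchk]
        symm
        rw [decide_eq_false_iff_not]
        intro HP
        exact hchk (HP k hk le_rfl (by omega))
    · rw [if_neg hmem, if_pos rfl]
      have hidxk : cs.idxOf cs[k] = k := by
        have h1 : List.idxOf cs[k] (cs.take k ++ cs.drop k) = k := by
          rw [List.idxOf_append_of_notMem hmem, List.drop_eq_getElem_cons hk, List.idxOf_cons_self]
          simp [List.length_take]
          omega
        simpa [List.take_append_drop] using h1
      have hset : pySetIntA dist ((cs[k].toNat - 97 : Nat) : Int) (k : Int)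
          = dist.set (cs[k].toNat - 97) (k : Int) := by
        unfold pySetIntA
        rw [if_neg (by omega)]
        simp
      rw [hset]
      have hdist' : ∀ c' : Char, 97 ≤ c'.toNat → c'.toNat - 97 < distance.length →
          (dist.set (cs[k].toNat - 97) (k : Int)).getD (c'.toNat - 97) 0
            = if c' ∈ cs.take (k + 1) then (cs.idxOf c' : Int) else -1 := by
        intro c' h1 h2
        by_cases hcc : c' = cs[k]
        · subst hcc
          rw [List.getD_eq_getElem?_getD, List.getElem?_set_self (by omega)]
          rw [if_pos ((List.mem_take_iff_idxOf_lt hcm).mpr (by omega))]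
          rw [hidxk]
          rfl
        · have htn : c'.toNat ≠ cs[k].toNat := fun he => hcc (Char.ext (UInt32.toNat_inj.mp he))
          have hss : c'.toNat - 97 ≠ cs[k].toNat - 97 := by omega
          rw [List.getD_eq_getElem?_getD, List.getElem?_set_ne (by omega),
            ← List.getD_eq_getElem?_getD, hdist c' h1 h2]
          refine if_congr ?_ rfl rfl
          rw [List.take_add_one, List.getElem?_eq_getElem hk]
          simp only [Option.toList_some, List.mem_append, List.mem_singleton]
          constructor
          · exact Or.inl
          · rintro (h | h)
            · exact h
            · exact absurd h hcc
      rw [hcast, ih (k + 1) _ (by omega) (by simp [hlen]) hdist']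
      rw [decide_eq_decide]
      constructor
      · intro H i hi hki hne
        rcases Nat.eq_or_lt_of_le hki with he | hlt
        · subst he; exact absurd hidxk hne
        · exact H i hi hlt hne
      · intro H i hi hki hne
        exact H i hi (by omega) hne

-- ===== VERDICT (by name: the statement is the Claim_ definition above) =====
theorem checkDistances_spec : Claim_equal_checkDistances := by
  intro s distance hDom hPre
  unfold Spec_checkDistances
  rw [alt_eq_spec s distance hPre]
  unfold checkDistances
  have hP : ∀ c ∈ s.toList, 97 ≤ c.toNat ∧ c.toNat - 97 < distance.length :=
    pre_forall s distance hPre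
  have hA := goA_spec s.toList distance hP s.toList.length 0
    (List.replicate distance.length (-1)) (by omega) (by simp)
    (by
      intro c' h1 h2
      simp [List.getD_eq_getElem?_getD, h2])
  rw [Nat.cast_zero] at hA
  rw [hA, Bool.eq_iff_iff, decide_eq_true_eq, specB_iff]
  constructor
  · intro H i hi hne
    exact H i hi (Nat.zero_le i) hne
  · intro H i hi _ hne
    exact H i hi hne
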